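-- pv_equiv track=rewrite | github.com/SAIGAWALI/Metro-Journey-Planner | interchanges.py | get_interchanges
-- ===== SOURCE A (Python) =====
-- def get_interchanges(path):
--     if not path or len(path) < 2:
--         return []
--
--     interchanges = []
--     prev_line = path[0].split("~")[-1]
--
--     for i in range(1, len(path)):
--         curr_line = path[i].split("~")[-1]
--         if curr_line != prev_line:
--             interchanges.append((path[i - 1], path[i]))
--         prev_line = curr_line
--
--     return interchanges
-- ===== SOURCE B (Python) =====
-- def get_interchanges(path):
--     # Pass 1: partition the path into maximal runs of consecutive stops on the same line.
--     runs = []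
--     for p in path:
--         line = p.split("~")[-1]
--         if runs and runs[-1][0] == line:
--             runs[-1][1].append(p)
--         else:
--             runs.append((line, [p]))
--     # Pass 2: each boundary between consecutive runs is an interchange:
--     # (last stop of the earlier run, first stop of the later run).
--     return [(g1[-1], g2[0]) for (_, g1), (_, g2) in zip(runs, runs[1:])]
-- ===== Notes on version B (the rewrite author's own statement) =====
-- stated objective: alternative
-- what changed: Instead of A's single pass threading a rolling prev_line through index arithmetic and collecting pairs on the fly, B first partitions the path into maximal runs of same-line stops (a run-length-grouping structure), then reads each interchange off the boundary between consecutive runs as (last of run k, first of run k+1).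
import Mathlib
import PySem

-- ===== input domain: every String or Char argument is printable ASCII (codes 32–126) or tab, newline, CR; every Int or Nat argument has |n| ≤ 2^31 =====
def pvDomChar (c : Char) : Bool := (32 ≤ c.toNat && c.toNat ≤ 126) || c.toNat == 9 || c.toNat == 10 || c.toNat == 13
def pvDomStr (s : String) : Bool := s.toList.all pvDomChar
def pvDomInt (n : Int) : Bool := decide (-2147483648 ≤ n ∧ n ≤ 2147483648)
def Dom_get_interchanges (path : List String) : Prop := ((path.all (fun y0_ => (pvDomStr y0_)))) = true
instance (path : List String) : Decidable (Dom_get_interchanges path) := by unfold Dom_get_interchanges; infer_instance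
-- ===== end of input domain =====

-- B replaces A's rolling prev_line scan with run-length grouping: partition the path into
-- maximal same-line runs, then read interchanges off run boundaries; objective: alternative, same cost.

-- p.split("~")[-1]  (split? with a nonempty separator always returns a nonempty list, so the defaults never fire)
def pvLine (s : String) : String :=
  (PySem.List.pyGet? ((PySem.Str.split? s "~").getD []) (-1)).getD ""

-- ===== PORT A =====
-- one loop body step of A, over the full path (indices via pyGet?; defaults never fire: 1 ≤ i < len)
def pvStepA (full : List String) (st : List (String × String) × String) (i : Int) :
    List (String × String) × String :=
  let curr := pvLine ((PySem.List.pyGet? full i).getD "")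
  let acc := if curr ≠ st.2 then
      st.1 ++ [(((PySem.List.pyGet? full (i - 1)).getD ""), ((PySem.List.pyGet? full i).getD ""))]
    else st.1
  (acc, curr)

def get_interchanges (path : List String) : List (String × String) :=
  if path = [] ∨ path.length < 2 then []
  else
    let prev_line := pvLine ((PySem.List.pyGet? path 0).getD "")
    ((PySem.List.pyRange 1 (path.length : Int) 1).foldl (pvStepA path) ([], prev_line)).1

-- ===== PORT B =====
-- one step of B's pass 1: append p to the last run if it is on the same line, else open a new run
def pvStepB (runs : List (String × List String)) (p : String) : List (String × List String) :=
  let line := pvLine p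
  match runs.getLast? with
  | some (l, g) => if l = line then runs.dropLast ++ [(l, g ++ [p])] else runs ++ [(line, [p])]
  | none => runs ++ [(line, [p])]

-- B's pass 2: (g1[-1], g2[0]) over consecutive runs
def pvBounds (runs : List (String × List String)) : List (String × String) :=
  (runs.zip runs.tail).map (fun gg =>
    ((PySem.List.pyGet? gg.1.2 (-1)).getD "", (PySem.List.pyGet? gg.2.2 0).getD ""))

def get_interchanges_alt (path : List String) : List (String × String) :=
  pvBounds (path.foldl pvStepB [])

-- ===== PRECONDITION & SPEC =====
def Spec_get_interchanges (path : List String) (out : List (String × String)) : Prop := out = get_interchanges_alt path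
instance (path : List String) (out : List (String × String)) : Decidable (Spec_get_interchanges path out) := by unfold Spec_get_interchanges; infer_instance

-- ===== CLAIM (what is proved, stated in full; the proofs are below) =====
def Claim_equal_get_interchanges : Prop := ∀ (path : List String), Dom_get_interchanges path → Spec_get_interchanges path (get_interchanges path)

-- ===== LEMMAS AND PROOFS =====

-- reference recursion: the interchange pairs of (a :: xs) scanned pairwise
def pvChase (a : String) : List String → List (String × String)
  | [] => []
  | b :: rest => (if pvLine b ≠ pvLine a then [(a, b)] else []) ++ pvChase b rest

lemma bounds_cons2 (x y : String × List String) (t : List (String × List String)) :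
    pvBounds (x :: y :: t) =
      ((PySem.List.pyGet? x.2 (-1)).getD "", (PySem.List.pyGet? y.2 0).getD "") :: pvBounds (y :: t) := by
  simp [pvBounds]

lemma bounds_snoc (rs : List (String × List String)) (r₀ r : String × List String) :
    pvBounds (rs ++ [r₀, r]) = pvBounds (rs ++ [r₀]) ++
      [((PySem.List.pyGet? r₀.2 (-1)).getD "", (PySem.List.pyGet? r.2 0).getD "")] := by
  induction rs with
  | nil => simp [pvBounds]
  | cons z rs' ih =>
    cases rs' with
    | nil => simp [pvBounds]
    | cons w t =>
      simp only [List.cons_append] at ih ⊢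
      rw [bounds_cons2, bounds_cons2, ih]
      simp

lemma bounds_head (rs : List (String × List String)) (l : String) (G G' : List String)
    (h : PySem.List.pyGet? G 0 = PySem.List.pyGet? G' 0) :
    pvBounds (rs ++ [(l, G)]) = pvBounds (rs ++ [(l, G')]) := by
  induction rs with
  | nil => simp [pvBounds]
  | cons z rs' ih =>
    cases rs' with
    | nil => simp [pvBounds, h]
    | cons w t =>
      simp only [List.cons_append] at ih ⊢
      rw [bounds_cons2, bounds_cons2, ih]

lemma head_snoc_snoc (g : List String) (a x : String) :
    PySem.List.pyGet? ((g ++ [a]) ++ [x]) 0 = PySem.List.pyGet? (g ++ [a]) 0 := by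
  cases g <;> simp [PySem.List.pyGet?_zero_cons]

-- B's fold invariant: processing xs when the last run ends with a (of line pvLine a)
lemma foldB (xs : List String) : ∀ (pre : List (String × List String)) (a : String) (g : List String),
    pvBounds (List.foldl pvStepB (pre ++ [(pvLine a, g ++ [a])]) xs)
      = pvBounds (pre ++ [(pvLine a, g ++ [a])]) ++ pvChase a xs := by
  induction xs with
  | nil => intro pre a g; simp [pvChase]
  | cons x rest ih =>
    intro pre a g
    rw [List.foldl_cons]
    have hlast : (pre ++ [(pvLine a, g ++ [a])]).getLast? = some (pvLine a, g ++ [a]) :=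
      List.getLast?_concat
    by_cases h : pvLine a = pvLine x
    · have hstep : pvStepB (pre ++ [(pvLine a, g ++ [a])]) x
          = pre ++ [(pvLine x, (g ++ [a]) ++ [x])] := by
        simp [pvStepB, h]

      rw [hstep, ih pre x (g ++ [a])]
      rw [bounds_head pre (pvLine x) ((g ++ [a]) ++ [x]) (g ++ [a]) (head_snoc_snoc g a x)]
      rw [← h]
      simp [pvChase, h.symm]
    · have hstep : pvStepB (pre ++ [(pvLine a, g ++ [a])]) x
          = (pre ++ [(pvLine a, g ++ [a])]) ++ [(pvLine x, [] ++ [x])] := by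
        simp [pvStepB, hlast, h]
      rw [hstep]
      rw [ih (pre ++ [(pvLine a, g ++ [a])]) x []]
      rw [show pre ++ [(pvLine a, g ++ [a])] ++ [(pvLine x, [] ++ [x])]
            = pre ++ [(pvLine a, g ++ [a]), (pvLine x, [] ++ [x])] by simp,
          bounds_snoc]
      have hne : pvLine x ≠ pvLine a := fun e => h e.symm
      simp [pvChase, hne, PySem.List.pyGet?_neg_one_append_singleton]

lemma altB (a : String) (xs : List String) :
    get_interchanges_alt (a :: xs) = pvChase a xs := by
  have h0 : pvStepB [] a = [] ++ [(pvLine a, [] ++ [a])] := by rfl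
  simp only [get_interchanges_alt, List.foldl_cons, h0]
  rw [foldB xs [] a []]
  simp [pvBounds]

lemma loopA (xs : List String) : ∀ (pre : List String) (x : String)
    (acc : List (String × String)),
    ((PySem.List.pyRange ((pre.length : Int) + 1) (((pre ++ x :: xs).length : Int)) 1).foldl
        (pvStepA (pre ++ x :: xs)) (acc, pvLine x)).1 = acc ++ pvChase x xs := by
  induction xs with
  | nil =>
    intro pre x acc
    simp [PySem.List.pyRange, pvChase]
  | cons y ys ih =>
    intro pre x acc
    have hlen : ((pre ++ x :: y :: ys).length : Int) = (pre.length : Int) + 2 + ys.length := by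
      simp; omega
    have hcons : PySem.List.pyRange ((pre.length : Int) + 1) (((pre ++ x :: y :: ys).length : Int)) 1
        = ((pre.length : Int) + 1) :: PySem.List.pyRange ((pre.length : Int) + 2) (((pre ++ x :: y :: ys).length : Int)) 1 := by
      rw [PySem.List.pyRange_one_cons (by rw [hlen]; omega)]
      ring_nf
    have hget : PySem.List.pyGet? (pre ++ x :: y :: ys) ((pre.length : Int) + 1)
        = some y := by
      have : pre ++ x :: y :: ys = (pre ++ [x]) ++ y :: ys := by simp
      rw [this]
      have := PySem.List.pyGet?_append_length (pre := pre ++ [x]) (y := y) (ys := ys)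
      simpa using this
    have hget' : PySem.List.pyGet? (pre ++ x :: y :: ys) ((pre.length : Int) + 1 - 1)
        = some x := by
      have h0 : ((pre.length : Int) + 1 - 1) = (pre.length : Int) := by omega
      rw [h0]
      exact PySem.List.pyGet?_append_length (pre := pre) (y := x) (ys := y :: ys)
    rw [hcons, List.foldl_cons]
    have hstep : pvStepA (pre ++ x :: y :: ys) (acc, pvLine x) ((pre.length : Int) + 1)
        = ((if pvLine y ≠ pvLine x then acc ++ [(x, y)] else acc), pvLine y) := by
      simp [pvStepA, hget]
    rw [hstep]
    have := ih (pre ++ [x]) y (if pvLine y ≠ pvLine x then acc ++ [(x, y)] else acc)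
    simp only [List.append_assoc, List.cons_append, List.nil_append, List.length_append,
      List.length_cons, List.length_nil] at this ⊢
    have harg : ((pre.length : Int) + 2) = (((pre.length + 1 : Nat)) : Int) + 1 := by push_cast; omega
    rw [harg]
    rw [this]
    by_cases h : pvLine y = pvLine x
    · simp [pvChase, h]
    · simp [pvChase, h]

lemma eqA (a b : String) (r : List String) :
    get_interchanges (a :: b :: r) = pvChase a (b :: r) := by
  have hguard : ¬ ((a :: b :: r) = [] ∨ (a :: b :: r).length < 2) := by simp
  simp only [get_interchanges, if_neg hguard]
  have hget0 : PySem.List.pyGet? (a :: b :: r) 0 = some a := PySem.List.pyGet?_zero_cons a (b :: r)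
  rw [hget0]
  have := loopA (b :: r) [] a []
  simpa using this

-- ===== VERDICT (by name: the statement is the Claim_ definition above) =====
theorem get_interchanges_spec : Claim_equal_get_interchanges := by
  intro path _
  unfold Spec_get_interchanges
  match path with
  | [] => rfl
  | [a] => rfl
  | a :: b :: r => rw [eqA, altB]
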